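-- pv_equiv track=rewrite | github.com/NJKode/advent-of-code-2023 | day14/python/p1.py | transpose_lines
-- ===== SOURCE A (Python) =====
-- def transpose_lines(lines):
-- 	lines_t = []
-- 	for c in range(len(lines[0])):
-- 		line = []
-- 		for y in range(len(lines)):
-- 			line.insert(0, (lines[y][c]))
-- 		lines_t.append(line)
-- 	return lines_t
-- ===== SOURCE B (Python) =====
-- def transpose_lines(lines):
-- 	cols = [[] for _ in lines[0]]
-- 	for row in reversed(lines):
-- 		for col, ch in zip(cols, row):
-- 			col.append(ch)
-- 	return cols
-- ===== Notes on version B (the rewrite author's own statement) =====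
-- stated objective: alternative
-- what changed: Instead of A's column-by-column nested index loops with insert(0), B makes a single row-major pass: it walks the rows once in reverse and appends each row's characters onto a vector of column accumulators built in advance.
import Mathlib
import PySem

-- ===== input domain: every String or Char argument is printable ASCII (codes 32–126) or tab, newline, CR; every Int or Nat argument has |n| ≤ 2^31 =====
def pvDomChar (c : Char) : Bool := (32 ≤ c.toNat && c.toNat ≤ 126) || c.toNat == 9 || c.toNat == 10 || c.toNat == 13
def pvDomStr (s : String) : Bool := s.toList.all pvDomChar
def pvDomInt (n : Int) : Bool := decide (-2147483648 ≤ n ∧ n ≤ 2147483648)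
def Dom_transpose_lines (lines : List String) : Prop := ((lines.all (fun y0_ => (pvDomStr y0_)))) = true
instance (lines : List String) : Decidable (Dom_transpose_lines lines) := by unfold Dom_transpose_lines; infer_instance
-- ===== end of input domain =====

-- B replaces A's column-by-column nested index loops (insert(0) per element) with a single
-- row-major pass: walk the rows once in reverse, appending each row's characters onto
-- pre-built column accumulators; equal on non-empty grids whose first line is no longer
-- than any other (A raises IndexError elsewhere).

-- ===== PORT A =====
-- loop 'for c in range(len(lines[0]))', inner 'for y in range(len(lines))' with line.insert(0, lines[y][c]);
-- lines[y][c] ported via PySem pyGet? (none = IndexError, excluded by Pre_); Python's 1-char string becomes String.ofList [ch].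
def transpose_lines (lines : List String) : List (List String) :=
  let w : Nat := (match lines with | [] => (0:Int) | l0 :: _ => PySem.Str.len l0).toNat
  (List.range w).foldl (fun lines_t c =>
    let line := (List.range lines.length).foldl (fun line y =>
      (((PySem.List.pyGet? lines (Int.ofNat y)).bind
          (fun s => (PySem.Str.pyGet? s (Int.ofNat c)).map (fun ch => String.ofList [ch]))).getD "") :: line) []
    lines_t ++ [line]) []

-- ===== PORT B =====
-- Python's 'for col, ch in zip(cols, row): col.append(ch)': columns beyond the end of the
-- shorter of cols/row are left untouched, hence the structural recursion on both lists.
def pvZipAppend (cols : List (List String)) (row : List Char) : List (List String) :=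
  match cols, row with
  | [], _ => []
  | cs, [] => cs
  | c :: cs, ch :: r => (c ++ [String.ofList [ch]]) :: pvZipAppend cs r

-- 'cols = [[] for _ in lines[0]]' then 'for row in reversed(lines): …'; lines[0] on [] raises in
-- Python (excluded by Pre_), headD "" gives the unclaimed value [] there.
def transpose_lines_alt (lines : List String) : List (List String) :=
  let init : List (List String) := (lines.headD "").toList.map (fun _ => ([] : List String))
  lines.reverse.foldl (fun cols row => pvZipAppend cols row.toList) init

-- ===== PRECONDITION & SPEC =====
-- Pre_ excludes exactly the inputs where A raises IndexError: empty input (lines[0]) and grids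
-- where some line is shorter than the first (lines[y][c] out of range).
def Pre_transpose_lines (lines : List String) : Prop :=
  lines ≠ [] ∧ ∀ l ∈ lines, (lines.headD "").toList.length ≤ l.toList.length
instance (lines : List String) : Decidable (Pre_transpose_lines lines) := by
  unfold Pre_transpose_lines; infer_instance
def pvWitness_transpose_lines : List String := ["ab", "cd", "ef"]

def Spec_transpose_lines (lines : List String) (out : List (List String)) : Prop := out = transpose_lines_alt lines
instance (lines : List String) (out : List (List String)) : Decidable (Spec_transpose_lines lines out) := by unfold Spec_transpose_lines; infer_instance

-- ===== CLAIM (what is proved, stated in full; the proofs are below) =====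
def Claim_equal_transpose_lines : Prop := ∀ (lines : List String), Dom_transpose_lines lines → Pre_transpose_lines lines → Spec_transpose_lines lines (transpose_lines lines)

-- ===== LEMMAS AND PROOFS =====

-- A's inner loop: foldl with cons builds the reverse of the mapped range.
theorem foldl_cons_map_reverse {α β : Type} (g : α → β) (xs : List α) (acc : List β) :
    xs.foldl (fun acc y => g y :: acc) acc = (xs.map g).reverse ++ acc := by
  induction xs generalizing acc with
  | nil => simp
  | cons x xs ih => simp [List.foldl_cons, ih]

theorem pvZipAppend_length (cols : List (List String)) (row : List Char) :
    (pvZipAppend cols row).length = cols.length := by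
  induction cols generalizing row with
  | nil => simp [pvZipAppend]
  | cons c cs ih =>
    cases row with
    | nil => simp [pvZipAppend]
    | cons ch r => simp [pvZipAppend, ih]

theorem pvZipAppend_getD (cols : List (List String)) (row : List Char) (c : Nat)
    (hc : c < cols.length) (hr : c < row.length) :
    (pvZipAppend cols row).getD c [] = cols.getD c [] ++ [String.ofList [row.getD c ' ']] := by
  induction cols generalizing row c with
  | nil => simp at hc
  | cons x xs ih =>
    cases row with
    | nil => simp at hr
    | cons ch r =>
      cases c with
      | zero => simp [pvZipAppend]
      | succ n =>
        simp only [pvZipAppend, List.getD_cons_succ]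
        exact ih r n (by simpa using hc) (by simpa using hr)

-- The row-major fold, characterised column by column.
theorem foldl_pvZipAppend (rows : List (List Char)) (cols : List (List String))
    (h : ∀ r ∈ rows, cols.length ≤ r.length) :
    rows.foldl (fun cs r => pvZipAppend cs r) cols
      = (List.range cols.length).map
          (fun c => cols.getD c [] ++ rows.map (fun r => String.ofList [r.getD c ' '])) := by
  induction rows generalizing cols with
  | nil =>
    apply List.ext_getElem
    · simp
    · intro k hk1 hk2
      simp only [List.foldl_nil] at hk1
      simp [List.getD_eq_getElem?_getD, List.getElem?_eq_getElem hk1]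
  | cons r rows ih =>
    simp only [List.foldl_cons]
    rw [ih (pvZipAppend cols r)
        (by intro r' hr'; rw [pvZipAppend_length]; exact h r' (List.mem_cons_of_mem _ hr'))]
    rw [pvZipAppend_length]
    apply List.map_congr_left
    intro c hc
    rw [List.mem_range] at hc
    rw [pvZipAppend_getD cols r c hc (lt_of_lt_of_le hc (h r List.mem_cons_self))]
    simp [List.map_cons]

-- ===== VERDICT (by name: the statement is the Claim_ definition above) =====
theorem transpose_lines_spec : Claim_equal_transpose_lines := by
  intro lines _ hpre
  unfold Spec_transpose_lines
  obtain ⟨hne, hmin⟩ := hpre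
  obtain ⟨l0, rest, rfl⟩ := List.exists_cons_of_ne_nil hne
  simp only [List.headD_cons] at hmin
  set w := l0.toList.length with hw
  -- A's value
  have hA : transpose_lines (l0 :: rest)
      = (List.range w).map (fun c => (l0 :: rest).reverse.map
          (fun l => String.ofList [l.toList.getD c ' '])) := by
    unfold transpose_lines
    simp only
    rw [show (PySem.Str.len l0).toNat = w by simp [PySem.Str.len_eq, hw]]
    rw [PySem.List.foldl_append_singleton_eq_map, List.nil_append]
    apply List.map_congr_left
    intro c hc
    rw [List.mem_range] at hc
    rw [foldl_cons_map_reverse, List.append_nil]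
    simp only [Int.ofNat_eq_natCast]
    apply List.ext_getElem
    · simp
    · intro k hk1 hk2
      simp only [List.getElem_reverse, List.getElem_map, List.getElem_range,
        List.length_map, List.length_range]
      have hkn : k < (l0 :: rest).length := by simpa using hk2
      have hy : (l0 :: rest).length - 1 - k < (l0 :: rest).length := by omega
      rw [PySem.List.pyGet?_natCast, List.getElem?_eq_getElem hy]
      simp only [Option.bind_some]
      have hcl : c < (l0 :: rest)[(l0 :: rest).length - 1 - k].toList.length :=
        lt_of_lt_of_le hc (hmin _ (List.getElem_mem hy))
      rw [PySem.Str.pyGet?_natCast, List.getElem?_eq_getElem hcl]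
      rw [List.getD_eq_getElem?_getD, List.getElem?_eq_getElem hcl]
      simp
  -- B's value
  have hB : transpose_lines_alt (l0 :: rest)
      = (List.range w).map (fun c => (l0 :: rest).reverse.map
          (fun l => String.ofList [l.toList.getD c ' '])) := by
    unfold transpose_lines_alt
    simp only [List.headD_cons]
    have hfm : ((l0 :: rest).reverse.foldl (fun cols row => pvZipAppend cols row.toList)
        (l0.toList.map (fun _ => ([] : List String))))
        = ((l0 :: rest).reverse.map String.toList).foldl (fun cs r => pvZipAppend cs r)
            (l0.toList.map (fun _ => ([] : List String))) := by
      rw [List.foldl_map]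
    rw [hfm, foldl_pvZipAppend]
    · simp only [List.length_map]
      apply List.map_congr_left
      intro c hc
      rw [List.mem_range] at hc
      have hinit : (l0.toList.map (fun _ => ([] : List String))).getD c [] = [] := by
        rw [List.getD_eq_getElem?_getD, List.getElem?_eq_getElem (by simpa using hc)]
        simp
      rw [hinit, List.nil_append, List.map_map]
      rfl
    · intro r hr
      obtain ⟨l, hl, rfl⟩ := List.mem_map.mp hr
      simpa using hmin l (List.mem_reverse.mp hl)
  rw [hA, hB]
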